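-- pv_equiv track=rewrite | github.com/janjunjon/master-core | src/ML/Other/HeavyRainCases.py | getIndexes
-- ===== SOURCE A (Python) =====
-- def getIndexes(T, LAT, LON):
--     count = 0
--     indexes = []
--     for t in range(248):
--         for lat in range(253):
--             for lon in range(241):
--                 if t in T and lat in LAT and lon in LON:
--                     indexes.append(count)
--                 count += 1
--     return indexes
-- ===== SOURCE B (Python) =====
-- def getIndexes(T, LAT, LON):
--     ts = [t for t in range(248) if t in T]
--     lats = [lat for lat in range(253) if lat in LAT]
--     lons = [lon for lon in range(241) if lon in LON]
--     return [t * 60973 + lat * 241 + lon for t in ts for lat in lats for lon in lons]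
-- ===== Notes on version B (the rewrite author's own statement) =====
-- stated objective: faster
-- what changed: Instead of scanning all 248*253*241 grid cells with a running counter and a membership test per cell, B filters each coordinate range once and triple-loops only over the matching values, computing the flat index t*253*241 + lat*241 + lon arithmetically.
import Mathlib
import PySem

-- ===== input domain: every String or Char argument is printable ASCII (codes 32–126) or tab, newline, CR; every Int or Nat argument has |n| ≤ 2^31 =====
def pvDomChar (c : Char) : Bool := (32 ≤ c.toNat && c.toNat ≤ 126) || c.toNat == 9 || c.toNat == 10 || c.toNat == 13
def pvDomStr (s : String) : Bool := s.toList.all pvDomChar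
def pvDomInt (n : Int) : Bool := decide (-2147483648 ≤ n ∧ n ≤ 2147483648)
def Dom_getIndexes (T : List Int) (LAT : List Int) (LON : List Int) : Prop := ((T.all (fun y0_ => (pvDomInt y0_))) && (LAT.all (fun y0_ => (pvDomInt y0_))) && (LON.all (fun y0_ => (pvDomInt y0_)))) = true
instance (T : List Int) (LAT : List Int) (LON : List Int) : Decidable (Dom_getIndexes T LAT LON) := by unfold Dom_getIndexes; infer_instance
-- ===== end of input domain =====

set_option maxHeartbeats 1000000
set_option maxRecDepth 8000


-- B replaces A's scan of all 248*253*241 grid cells (with a running counter and a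
-- membership test per cell) by filtering each coordinate range once and looping only
-- over the matching values, computing the flat index arithmetically (objective: faster).

-- ===== PORT A =====
def getIndexes (T : List Int) (LAT : List Int) (LON : List Int) : List Int :=
  ((PySem.List.pyRange 0 248 1).foldl (fun (s : Int × List Int) t =>
    (PySem.List.pyRange 0 253 1).foldl (fun (s : Int × List Int) lat =>
      (PySem.List.pyRange 0 241 1).foldl (fun (s : Int × List Int) lon =>
        let s' := if t ∈ T ∧ lat ∈ LAT ∧ lon ∈ LON then (s.1, s.2 ++ [s.1]) else s
        (s'.1 + 1, s'.2)) s) s) ((0 : Int), ([] : List Int))).2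

-- ===== PORT B =====
def getIndexes_alt (T : List Int) (LAT : List Int) (LON : List Int) : List Int :=
  let ts := (PySem.List.pyRange 0 248 1).filter (fun t => decide (t ∈ T))
  let lats := (PySem.List.pyRange 0 253 1).filter (fun lat => decide (lat ∈ LAT))
  let lons := (PySem.List.pyRange 0 241 1).filter (fun lon => decide (lon ∈ LON))
  ts.flatMap (fun t => lats.flatMap (fun lat =>
    lons.map (fun lon => t * 60973 + lat * 241 + lon)))

-- ===== PRECONDITION & SPEC =====
def Spec_getIndexes (T : List Int) (LAT : List Int) (LON : List Int) (out : List Int) : Prop := out = getIndexes_alt T LAT LON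
instance (T : List Int) (LAT : List Int) (LON : List Int) (out : List Int) : Decidable (Spec_getIndexes T LAT LON out) := by unfold Spec_getIndexes; infer_instance

-- ===== CLAIM (what is proved, stated in full; the proofs are below) =====
def Claim_equal_getIndexes : Prop := ∀ (T : List Int) (LAT : List Int) (LON : List Int), Dom_getIndexes T LAT LON → Spec_getIndexes T LAT LON (getIndexes T LAT LON)

-- ===== LEMMAS AND PROOFS =====

/-- A counter-carrying fold over `range(n)`: if each step adds `k` to the counter and
appends a block depending on the element and the counter, the final counter is `c + n*k`
and the output is the concatenation of the blocks at counters `c + x*k`. -/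
theorem pvCounterFold (body : (Int × List Int) → Int → (Int × List Int)) (k : Int)
    (g : Int → Int → List Int)
    (hb : ∀ (c : Int) (acc : List Int) (x : Int), body (c, acc) x = (c + k, acc ++ g x c)) :
    ∀ (n : Nat) (c : Int) (acc : List Int),
      (PySem.List.pyRange 0 (n : Int) 1).foldl body (c, acc)
        = (c + n * k, acc ++ (PySem.List.pyRange 0 (n : Int) 1).flatMap (fun x => g x (c + x * k))) := by
  intro n
  induction n with
  | zero =>
    intro c acc
    simp [PySem.List.pyRange_one_eq_nil]
  | succ n ih =>
    intro c acc
    have hsplit : PySem.List.pyRange 0 ((n + 1 : Nat) : Int) 1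
        = PySem.List.pyRange 0 (n : Int) 1 ++ [(n : Int)] := by
      push_cast
      exact PySem.List.pyRange_one_succ_right (by positivity)
    rw [hsplit, List.foldl_append, ih, List.flatMap_append]
    simp only [List.foldl_cons, List.foldl_nil, List.flatMap_cons, List.flatMap_nil,
      List.append_nil, hb]
    rw [Prod.mk.injEq]
    refine ⟨by push_cast; ring, (List.append_assoc _ _ _)⟩

theorem pvFlatMapCongr {α β : Type} (l : List α) (f g : α → List β)
    (h : ∀ x ∈ l, f x = g x) : l.flatMap f = l.flatMap g := by
  induction l with
  | nil => rfl
  | cons a l ih =>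
    simp only [List.flatMap_cons, h a (List.mem_cons_self), ih (fun x hx => h x (List.mem_cons_of_mem a hx))]

/-- Pull a filter out of a flatMap whose body is an `if`. -/
theorem pvFlatMapIfFilter (l : List Int) (P : Int → Prop) [DecidablePred P]
    (g : Int → List Int) :
    l.flatMap (fun x => if P x then g x else [])
      = (l.filter (fun x => decide (P x))).flatMap g := by
  induction l with
  | nil => rfl
  | cons a l ih =>
    by_cases h : P a <;> simp [h, ih]

theorem getIndexes_eq_ifForm (T LAT LON : List Int) :
    getIndexes T LAT LON
      = (PySem.List.pyRange 0 248 1).flatMap (fun t =>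
          (PySem.List.pyRange 0 253 1).flatMap (fun lat =>
            (PySem.List.pyRange 0 241 1).flatMap (fun lon =>
              if t ∈ T ∧ lat ∈ LAT ∧ lon ∈ LON
              then [t * 60973 + lat * 241 + lon] else []))) := by
  have hinner : ∀ (t lat : Int) (c : Int) (acc : List Int),
      (PySem.List.pyRange 0 241 1).foldl (fun (s : Int × List Int) lon =>
        let s' := if t ∈ T ∧ lat ∈ LAT ∧ lon ∈ LON then (s.1, s.2 ++ [s.1]) else s
        (s'.1 + 1, s'.2)) (c, acc)
        = (c + 241 * 1, acc ++ (PySem.List.pyRange 0 241 1).flatMap (fun lon =>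
            if t ∈ T ∧ lat ∈ LAT ∧ lon ∈ LON then [c + lon * 1] else [])) := by
    intro t lat c acc
    have h := pvCounterFold
      (fun (s : Int × List Int) lon =>
        let s' := if t ∈ T ∧ lat ∈ LAT ∧ lon ∈ LON then (s.1, s.2 ++ [s.1]) else s
        (s'.1 + 1, s'.2)) 1
      (fun lon c => if t ∈ T ∧ lat ∈ LAT ∧ lon ∈ LON then [c] else [])
      (by
        intro c acc x
        by_cases hx : t ∈ T ∧ lat ∈ LAT ∧ x ∈ LON <;> simp [hx]) 241 c acc
    simp only [Nat.cast_ofNat] at h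
    exact h
  have hmid : ∀ (t : Int) (c : Int) (acc : List Int),
      (PySem.List.pyRange 0 253 1).foldl (fun (s : Int × List Int) lat =>
        (PySem.List.pyRange 0 241 1).foldl (fun (s : Int × List Int) lon =>
          let s' := if t ∈ T ∧ lat ∈ LAT ∧ lon ∈ LON then (s.1, s.2 ++ [s.1]) else s
          (s'.1 + 1, s'.2)) s) (c, acc)
        = (c + 253 * (241 * 1), acc ++ (PySem.List.pyRange 0 253 1).flatMap (fun lat =>
            (PySem.List.pyRange 0 241 1).flatMap (fun lon =>
              if t ∈ T ∧ lat ∈ LAT ∧ lon ∈ LON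
              then [c + lat * (241 * 1) + lon * 1] else []))) := by
    intro t c acc
    have h := pvCounterFold
      (fun (s : Int × List Int) lat =>
        (PySem.List.pyRange 0 241 1).foldl (fun (s : Int × List Int) lon =>
          let s' := if t ∈ T ∧ lat ∈ LAT ∧ lon ∈ LON then (s.1, s.2 ++ [s.1]) else s
          (s'.1 + 1, s'.2)) s) (241 * 1)
      (fun lat c => (PySem.List.pyRange 0 241 1).flatMap (fun lon =>
          if t ∈ T ∧ lat ∈ LAT ∧ lon ∈ LON then [c + lon * 1] else []))
      (by intro c acc lat; exact hinner t lat c acc) 253 c acc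
    simp only [Nat.cast_ofNat] at h
    exact h
  unfold getIndexes
  have h := pvCounterFold
    (fun (s : Int × List Int) t =>
      (PySem.List.pyRange 0 253 1).foldl (fun (s : Int × List Int) lat =>
        (PySem.List.pyRange 0 241 1).foldl (fun (s : Int × List Int) lon =>
          let s' := if t ∈ T ∧ lat ∈ LAT ∧ lon ∈ LON then (s.1, s.2 ++ [s.1]) else s
          (s'.1 + 1, s'.2)) s) s) (253 * (241 * 1))
    (fun t c => (PySem.List.pyRange 0 253 1).flatMap (fun lat =>
        (PySem.List.pyRange 0 241 1).flatMap (fun lon =>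
          if t ∈ T ∧ lat ∈ LAT ∧ lon ∈ LON
          then [c + lat * (241 * 1) + lon * 1] else [])))
    (by intro c acc t; exact hmid t c acc) 248 0 []
  simp only [Nat.cast_ofNat] at h
  rw [h, List.nil_append]
  refine pvFlatMapCongr _ _ _ (fun t _ => ?_)
  refine pvFlatMapCongr _ _ _ (fun lat _ => ?_)
  refine pvFlatMapCongr _ _ _ (fun lon _ => ?_)
  by_cases hc : t ∈ T ∧ lat ∈ LAT ∧ lon ∈ LON
  · rw [if_pos hc, if_pos hc]
    congr 1
    ring
  · rw [if_neg hc, if_neg hc]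

theorem pvFlatMapEmpty {α β : Type} (l : List α) :
    l.flatMap (fun _ => ([] : List β)) = [] := by
  induction l with
  | nil => rfl
  | cons a l ih => simp [ih]

theorem pvMapEqFlatMapSingleton {α β : Type} (l : List α) (f : α → β) :
    l.map f = l.flatMap (fun x => [f x]) := by
  induction l with
  | nil => rfl
  | cons a l ih => simp [ih]

theorem pvAltExpand (T LAT LON : List Int) :
    getIndexes_alt T LAT LON
      = ((PySem.List.pyRange 0 248 1).filter (fun t => decide (t ∈ T))).flatMap (fun t =>
          ((PySem.List.pyRange 0 253 1).filter (fun lat => decide (lat ∈ LAT))).flatMap (fun lat =>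
            ((PySem.List.pyRange 0 241 1).filter (fun lon => decide (lon ∈ LON))).map
              (fun lon => t * 60973 + lat * 241 + lon))) := rfl

-- ===== VERDICT (by name: the statement is the Claim_ definition above) =====
theorem getIndexes_spec : Claim_equal_getIndexes := by
  intro T LAT LON _
  unfold Spec_getIndexes
  rw [pvAltExpand, getIndexes_eq_ifForm]
  rw [← pvFlatMapIfFilter _ (fun t => t ∈ T)]
  refine pvFlatMapCongr _ _ _ (fun t _ => ?_)
  by_cases ht : t ∈ T
  · rw [if_pos ht, ← pvFlatMapIfFilter _ (fun lat => lat ∈ LAT)]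
    refine pvFlatMapCongr _ _ _ (fun lat _ => ?_)
    by_cases hlat : lat ∈ LAT
    · rw [if_pos hlat, pvMapEqFlatMapSingleton,
        ← pvFlatMapIfFilter _ (fun lon => lon ∈ LON)]
      refine pvFlatMapCongr _ _ _ (fun lon _ => ?_)
      by_cases hlon : lon ∈ LON
      · rw [if_pos ⟨ht, hlat, hlon⟩, if_pos hlon]
      · rw [if_neg (fun h => hlon h.2.2), if_neg hlon]
    · rw [if_neg hlat]
      exact (pvFlatMapCongr _ _ (fun _ => ([] : List Int))
        (fun lon _ => if_neg (fun h => hlat h.2.1))).trans (pvFlatMapEmpty _)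
  · rw [if_neg ht]
    refine (pvFlatMapCongr _ _ (fun _ => ([] : List Int)) (fun lat _ => ?_)).trans
      (pvFlatMapEmpty _)
    exact (pvFlatMapCongr _ _ (fun _ => ([] : List Int))
      (fun lon _ => if_neg (fun h => ht h.1))).trans (pvFlatMapEmpty _)
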